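-- pv_equiv track=rewrite | github.com/washimimizuku/60-days-advanced-data-ai | days/day-20-data-observability/solution.py | _identify_affected_consumers
-- ===== SOURCE A (Python) =====
-- from typing import Dict, List, Any, Optional, Tuple
--
-- def _identify_affected_consumers(table_name: str, changes: List[Dict]) -> List[Dict]:
--     """Identify consumers potentially affected by schema changes"""
--
--     # Simulate consumer identification
--     consumers = [
--         {'name': 'analytics_dashboard', 'type': 'dashboard', 'criticality': 'high'},
--         {'name': 'ml_pipeline', 'type': 'ml_model', 'criticality': 'medium'},
--         {'name': 'reporting_api', 'type': 'api', 'criticality': 'high'}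
--     ]
--
--     affected_consumers = []
--     for change in changes:
--         if change['is_breaking']:
--             # All consumers are potentially affected by breaking changes
--             affected_consumers.extend(consumers)
--         else:
--             # Only some consumers might be affected by non-breaking changes
--             affected_consumers.extend([c for c in consumers if c['criticality'] == 'high'])
--
--     # Remove duplicates
--     seen = set()
--     unique_consumers = []
--     for consumer in affected_consumers:
--         consumer_id = consumer['name']
--         if consumer_id not in seen:
--             seen.add(consumer_id)
--             unique_consumers.append(consumer)
--
--     return unique_consumers
-- ===== SOURCE B (Python) =====
-- def _identify_affected_consumers(table_name: str, changes):
--     """Identify consumers potentially affected by schema changes.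
--
--     Single pass: each consumer is notified at the first change that affects it
--     (breaking changes affect everyone, other changes only high-criticality
--     consumers); once every consumer is notified the scan stops.
--     """
--     consumers = [
--         {'name': 'analytics_dashboard', 'type': 'dashboard', 'criticality': 'high'},
--         {'name': 'ml_pipeline', 'type': 'ml_model', 'criticality': 'medium'},
--         {'name': 'reporting_api', 'type': 'api', 'criticality': 'high'},
--     ]
--     notified = []
--     waiting = consumers
--     for change in changes:
--         if not waiting:
--             break
--         still_waiting = []
--         for consumer in waiting:
--             if change['is_breaking'] or consumer['criticality'] == 'high':
--                 notified.append(consumer)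
--             else:
--                 still_waiting.append(consumer)
--         waiting = still_waiting
--     return notified
-- ===== Notes on version B (the rewrite author's own statement) =====
-- stated objective: alternative
-- what changed: A extends the result with all affected consumers for every change and then deduplicates with a seen-set; B keeps a shrinking list of not-yet-notified consumers and appends each consumer once, at the first change that affects it, stopping when nobody is left; Pre_ excludes changes lacking the 'is_breaking' key, on which A raises KeyError.
import Mathlib
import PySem

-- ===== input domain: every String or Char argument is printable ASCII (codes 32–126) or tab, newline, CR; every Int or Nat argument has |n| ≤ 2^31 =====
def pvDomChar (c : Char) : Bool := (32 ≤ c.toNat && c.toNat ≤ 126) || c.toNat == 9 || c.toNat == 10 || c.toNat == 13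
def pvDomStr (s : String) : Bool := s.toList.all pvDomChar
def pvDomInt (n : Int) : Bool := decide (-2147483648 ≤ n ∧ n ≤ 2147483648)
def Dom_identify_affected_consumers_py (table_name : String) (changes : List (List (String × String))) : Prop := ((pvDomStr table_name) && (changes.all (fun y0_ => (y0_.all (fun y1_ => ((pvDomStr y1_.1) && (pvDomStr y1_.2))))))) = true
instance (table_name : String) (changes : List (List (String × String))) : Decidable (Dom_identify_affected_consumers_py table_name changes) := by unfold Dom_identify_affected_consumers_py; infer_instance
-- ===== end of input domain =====

-- B replaces A's extend-everything-then-deduplicate accumulation by a single pass that keeps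
-- a shrinking list of not-yet-notified consumers and appends each consumer at the first change
-- affecting it (objective: alternative decomposition, same cost).

-- dict[str,str] lookup (first match); exact under Pre_ (key present — Python raises KeyError otherwise)
def pvLookup (d : List (String × String)) (k : String) : String :=
  (((d.find? (fun p => p.1 == k)).map (fun p => p.2)).getD "")

-- ===== PORT A =====
def pvConsumers : List (List (String × String)) :=
  [[("name", "analytics_dashboard"), ("type", "dashboard"), ("criticality", "high")],
   [("name", "ml_pipeline"), ("type", "ml_model"), ("criticality", "medium")],
   [("name", "reporting_api"), ("type", "api"), ("criticality", "high")]]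

-- the 'remove duplicates' loop of A: state = (seen, unique_consumers)
def pvDedupStep (st : PySem.Set String × List (List (String × String)))
    (consumer : List (String × String)) : PySem.Set String × List (List (String × String)) :=
  let consumer_id := pvLookup consumer "name"
  if PySem.Set.contains st.1 consumer_id then st
  else (PySem.Set.add st.1 consumer_id, st.2 ++ [consumer])

def identify_affected_consumers_py (table_name : String) (changes : List (List (String × String))) : List (List (String × String)) :=
  let affected_consumers := changes.foldl (fun acc change =>
    if pvLookup change "is_breaking" ≠ "" then acc ++ pvConsumers
    else acc ++ pvConsumers.filter (fun c => pvLookup c "criticality" == "high")) []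
  (affected_consumers.foldl pvDedupStep ((PySem.Set.empty : PySem.Set String), [])).2

-- ===== PORT B =====
-- the for-loop of B with its early break: state = (notified, waiting)
def pvNotifyLoop : List (List (String × String)) → List (List (String × String)) →
    List (List (String × String)) → List (List (String × String))
  | notified, _, [] => notified
  | notified, waiting, change :: rest =>
    if waiting.isEmpty then notified
    else
      -- inner loop over waiting: append to notified or to still_waiting
      let step := waiting.foldl (fun (st : List (List (String × String)) × List (List (String × String))) consumer =>
        if pvLookup change "is_breaking" ≠ "" || pvLookup consumer "criticality" == "high"
        then (st.1 ++ [consumer], st.2) else (st.1, st.2 ++ [consumer])) (notified, [])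
      pvNotifyLoop step.1 step.2 rest

def identify_affected_consumers_py_alt (table_name : String) (changes : List (List (String × String))) : List (List (String × String)) :=
  pvNotifyLoop [] pvConsumers changes

-- ===== PRECONDITION & SPEC =====
-- Pre_ excludes changes missing the 'is_breaking' key, on which Python A raises KeyError.
def Pre_identify_affected_consumers_py (table_name : String) (changes : List (List (String × String))) : Prop :=
  changes.all (fun c => c.any (fun p => p.1 == "is_breaking")) = true
instance (table_name : String) (changes : List (List (String × String))) : Decidable (Pre_identify_affected_consumers_py table_name changes) := by unfold Pre_identify_affected_consumers_py; infer_instance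

def pvWitness_identify_affected_consumers_py : String × (List (List (String × String))) :=
  ("orders", [[("is_breaking", "true")], [("is_breaking", "")]])

def Spec_identify_affected_consumers_py (table_name : String) (changes : List (List (String × String))) (out : List (List (String × String))) : Prop := out = identify_affected_consumers_py_alt table_name changes
instance (table_name : String) (changes : List (List (String × String))) (out : List (List (String × String))) : Decidable (Spec_identify_affected_consumers_py table_name changes out) := by unfold Spec_identify_affected_consumers_py; infer_instance

-- ===== CLAIM (what is proved, stated in full; the proofs are below) =====
def Claim_equal_identify_affected_consumers_py : Prop := ∀ (table_name : String) (changes : List (List (String × String))), Dom_identify_affected_consumers_py table_name changes → Pre_identify_affected_consumers_py table_name changes → Spec_identify_affected_consumers_py table_name changes (identify_affected_consumers_py table_name changes)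

-- ===== LEMMAS AND PROOFS =====

def pvDashboard : List (String × String) :=
  [("name", "analytics_dashboard"), ("type", "dashboard"), ("criticality", "high")]
def pvMl : List (String × String) :=
  [("name", "ml_pipeline"), ("type", "ml_model"), ("criticality", "medium")]
def pvApi : List (String × String) :=
  [("name", "reporting_api"), ("type", "api"), ("criticality", "high")]

-- the common closed form both sides are reduced to
def pvClosed (flags : List Bool) : List (List (String × String)) :=
  match flags with
  | [] => []
  | f :: _ =>
    if f then [pvDashboard, pvMl, pvApi]
    else if flags.any id then [pvDashboard, pvApi, pvMl]
    else [pvDashboard, pvApi]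

def pvBlock (f : Bool) : List (List (String × String)) :=
  if f then pvConsumers else pvConsumers.filter (fun c => pvLookup c "criticality" == "high")

lemma pvBlock_true : pvBlock true = [pvDashboard, pvMl, pvApi] := by decide
lemma pvBlock_false : pvBlock false = [pvDashboard, pvApi] := by decide

-- A side: once all three names are seen, a block sequence adds nothing
lemma pv_full (flags : List Bool) (st : PySem.Set String × List (List (String × String)))
    (hD : "analytics_dashboard" ∈ st.1) (hM : "ml_pipeline" ∈ st.1)
    (hR : "reporting_api" ∈ st.1) :
    (flags.flatMap pvBlock).foldl pvDedupStep st = st := by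
  induction flags with
  | nil => rfl
  | cons f rest ih =>
    have hblk : (pvBlock f).foldl pvDedupStep st = st := by
      cases f <;>
        simp [pvBlock_true, pvBlock_false, pvDedupStep, pvDashboard, pvMl, pvApi, pvLookup,
          PySem.Set.contains, hD, hM, hR]
    rw [List.flatMap_cons, List.foldl_append, hblk, ih]

-- A side: with dashboard and api seen but not ml, the remaining blocks add ml iff some flag is breaking
lemma pv_after_first (flags : List Bool) (seen : PySem.Set String)
    (out : List (List (String × String)))
    (hD : "analytics_dashboard" ∈ seen) (hR : "reporting_api" ∈ seen)
    (hM : "ml_pipeline" ∉ seen) :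
    ((flags.flatMap pvBlock).foldl pvDedupStep (seen, out)).2
      = out ++ (if flags.any id then [pvMl] else []) := by
  induction flags generalizing seen out with
  | nil => simp
  | cons f rest ih =>
    cases f with
    | false =>
      have hblk : (pvBlock false).foldl pvDedupStep (seen, out) = (seen, out) := by
        simp [pvBlock_false, pvDedupStep, pvDashboard, pvApi, pvLookup,
          PySem.Set.contains, hD, hR]
      rw [List.flatMap_cons, List.foldl_append, hblk, ih seen out hD hR hM]
      simp
    | true =>
      have hblk : (pvBlock true).foldl pvDedupStep (seen, out)
          = (seen ++ ["ml_pipeline"], out ++ [pvMl]) := by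
        simp [pvBlock_true, pvDedupStep, pvDashboard, pvMl, pvApi, pvLookup,
          PySem.Set.contains, PySem.Set.add, hD, hR, hM]
      rw [List.flatMap_cons, List.foldl_append, hblk,
        pv_full rest _ (by simp [hD]) (by simp) (by simp [hR])]
      simp

-- A side: A's whole computation reduced to the closed form on the flag list
lemma pv_main (flags : List Bool) :
    ((flags.foldl (fun acc f => acc ++ pvBlock f) []).foldl pvDedupStep
        ((PySem.Set.empty : PySem.Set String), [])).2 = pvClosed flags := by
  rw [PySem.List.foldl_append_eq_flatMap]
  cases flags with
  | nil => rfl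
  | cons f rest =>
    cases f with
    | true =>
      simp only [List.flatMap_cons, List.foldl_append, pvBlock_true, List.foldl_nil]
      have h3 : ([pvDashboard, pvMl, pvApi].foldl pvDedupStep
          ((PySem.Set.empty : PySem.Set String), []))
          = (["analytics_dashboard", "ml_pipeline", "reporting_api"],
             [pvDashboard, pvMl, pvApi]) := by decide
      rw [h3, pv_full rest _ (by decide) (by decide) (by decide)]
      simp [pvClosed]
    | false =>
      simp only [List.flatMap_cons, List.foldl_append, pvBlock_false, List.foldl_nil]
      have h2 : ([pvDashboard, pvApi].foldl pvDedupStep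
          ((PySem.Set.empty : PySem.Set String), []))
          = (["analytics_dashboard", "reporting_api"], [pvDashboard, pvApi]) := by decide
      rw [h2, pv_after_first rest _ _ (by decide) (by decide) (by decide)]
      simp only [pvClosed, List.any_cons, id, Bool.false_or]
      split <;> simp

-- B side: once waiting is empty the loop only returns notified
lemma pvNotify_nilWaiting (N : List (List (String × String)))
    (changes : List (List (String × String))) :
    pvNotifyLoop N [] changes = N := by
  cases changes <;> simp [pvNotifyLoop]

-- B side: only ml waits; it is appended iff some remaining change is breaking
lemma pvNotify_ml (changes : List (List (String × String)))
    (N : List (List (String × String))) :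
    pvNotifyLoop N [pvMl] changes
      = N ++ (if changes.any (fun c => decide (pvLookup c "is_breaking" ≠ "")) then [pvMl] else []) := by
  induction changes generalizing N with
  | nil => simp [pvNotifyLoop]
  | cons c rest ih =>
    simp only [pvNotifyLoop, List.isEmpty_cons, List.foldl_cons, List.foldl_nil, List.any_cons]
    rw [if_neg (by simp)]
    have hm : (pvLookup pvMl "criticality" == "high") = false := by decide
    rw [hm]
    by_cases h : pvLookup c "is_breaking" = ""
    · simp only [h]
      simpa using ih N
    · simp [h, pvNotify_nilWaiting]

-- B side: B's whole computation reduced to the same closed form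
lemma pvB_main (changes : List (List (String × String))) :
    pvNotifyLoop [] pvConsumers changes
      = pvClosed (changes.map (fun c => decide (pvLookup c "is_breaking" ≠ ""))) := by
  cases changes with
  | nil => rfl
  | cons c rest =>
    simp only [pvNotifyLoop, pvConsumers, List.isEmpty_cons, pvClosed, List.map_cons,
      List.any_cons, id]
    rw [if_neg (by simp)]
    by_cases h : pvLookup c "is_breaking" = ""
    · simp only [h]
      simp only [List.foldl_cons, List.foldl_nil]
      have h1 : (pvLookup [("name", "analytics_dashboard"), ("type", "dashboard"), ("criticality", "high")] "criticality" == "high") = true := by decide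
      have h2 : (pvLookup [("name", "ml_pipeline"), ("type", "ml_model"), ("criticality", "medium")] "criticality" == "high") = false := by decide
      have h3 : (pvLookup [("name", "reporting_api"), ("type", "api"), ("criticality", "high")] "criticality" == "high") = true := by decide
      simp only [h1, h2, h3]
      simp only [show (decide ((("" : String)) ≠ "") : Bool) = false from by decide]
      simp only [Bool.false_or, Bool.or_false, if_true, if_false, Bool.false_eq_true]
      rw [show ([] ++ [[("name", "analytics_dashboard"), ("type", "dashboard"), ("criticality", "high")]] ++ [[("name", "reporting_api"), ("type", "api"), ("criticality", "high")]] : List (List (String × String))) = [pvDashboard, pvApi] from rfl,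
        show (([] : List (List (String × String))) ++ [[("name", "ml_pipeline"), ("type", "ml_model"), ("criticality", "medium")]]) = [pvMl] from rfl]
      rw [pvNotify_ml]
      rw [show (rest.map (fun c => decide (pvLookup c "is_breaking" ≠ ""))).any id
          = rest.any (fun c => decide (pvLookup c "is_breaking" ≠ "")) from by
        simp [List.any_map]]
      split <;> simp [pvDashboard, pvMl, pvApi]
    · simp only [show (decide (pvLookup c "is_breaking" ≠ "") : Bool) = true from by simp [h]]
      simp only [List.foldl_cons, List.foldl_nil, Bool.true_or, if_true]
      simp [pvNotify_nilWaiting, pvDashboard, pvMl, pvApi]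

-- ===== VERDICT (by name: the statement is the Claim_ definition above) =====
theorem identify_affected_consumers_py_spec : Claim_equal_identify_affected_consumers_py := by
  intro table_name changes _ _
  unfold Spec_identify_affected_consumers_py identify_affected_consumers_py
    identify_affected_consumers_py_alt
  have hA : changes.foldl (fun acc change =>
      if pvLookup change "is_breaking" ≠ "" then acc ++ pvConsumers
      else acc ++ pvConsumers.filter (fun c => pvLookup c "criticality" == "high")) []
      = (changes.map (fun change => decide (pvLookup change "is_breaking" ≠ ""))).foldl
          (fun acc f => acc ++ pvBlock f) [] := by
    rw [List.foldl_map]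
    congr 1
    funext acc c
    by_cases h : pvLookup c "is_breaking" = "" <;> simp [pvBlock, h]
  rw [hA, pv_main, pvB_main]
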